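-- pv_equiv track=rewrite | github.com/PikeNote/PythonCollection | NCBI_DSAP/orf.py | finalSequence
-- ===== SOURCE A (Python) =====
-- def finalSequence(codonList):
--   firstM = 0
--   finalSeq = []
--   for x in codonList:
--     if (x == 'M' and firstM == 0):
--       firstM += 1
--     if (firstM == 1):
--       finalSeq.append(x);
--   return finalSeq;
-- ===== SOURCE B (Python) =====
-- def finalSequence(codonList):
--   if 'M' in codonList:
--     return codonList[codonList.index('M'):]
--   return []
-- ===== Notes on version B (the rewrite author's own statement) =====
-- stated objective: simpler
-- what changed: Replaces A's flag-tracking accumulation loop with locate-then-slice: find the first 'M' with index() and return the suffix from there (or [] if absent).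
import Mathlib
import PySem

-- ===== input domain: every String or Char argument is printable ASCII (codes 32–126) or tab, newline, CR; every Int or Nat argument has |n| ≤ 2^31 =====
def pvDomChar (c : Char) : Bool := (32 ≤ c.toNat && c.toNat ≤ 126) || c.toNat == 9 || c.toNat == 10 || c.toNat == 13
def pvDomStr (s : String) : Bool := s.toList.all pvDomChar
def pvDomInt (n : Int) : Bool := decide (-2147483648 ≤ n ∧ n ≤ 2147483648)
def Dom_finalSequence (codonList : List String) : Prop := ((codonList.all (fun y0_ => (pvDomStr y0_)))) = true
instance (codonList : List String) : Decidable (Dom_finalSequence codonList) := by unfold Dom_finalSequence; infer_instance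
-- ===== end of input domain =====

-- B replaces A's flag-tracking accumulation loop with locate-then-slice (simpler decomposition, same cost).

-- ===== PORT A =====
-- A's loop body: update firstM, then conditionally append x.
def finalSequenceStep (st : Int × List String) (x : String) : Int × List String :=
  let firstM : Int := if x = "M" ∧ st.1 = 0 then st.1 + 1 else st.1
  (firstM, if firstM = 1 then st.2 ++ [x] else st.2)

def finalSequence (codonList : List String) : List String :=
  (codonList.foldl finalSequenceStep (0, [])).2

-- ===== PORT B =====
def finalSequence_alt (codonList : List String) : List String :=
  if "M" ∈ codonList then
    match PySem.List.index? codonList "M" with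
    | some i => PySem.List.slice codonList (some (i : Int)) none
    | none => []
  else []

-- ===== PRECONDITION & SPEC =====
def Spec_finalSequence (codonList : List String) (out : List String) : Prop := out = finalSequence_alt codonList
instance (codonList : List String) (out : List String) : Decidable (Spec_finalSequence codonList out) := by unfold Spec_finalSequence; infer_instance

-- ===== CLAIM (what is proved, stated in full; the proofs are below) =====
def Claim_equal_finalSequence : Prop := ∀ (codonList : List String), Dom_finalSequence codonList → Spec_finalSequence codonList (finalSequence codonList)

-- ===== LEMMAS AND PROOFS =====
-- Once the flag is 1, the loop appends every remaining element.
theorem finalSequenceStep_saturated (l : List String) (acc : List String) :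
    l.foldl finalSequenceStep (1, acc) = (1, acc ++ l) := by
  induction l generalizing acc with
  | nil => simp
  | cons x xs ih =>
      simp only [List.foldl_cons, finalSequenceStep]
      norm_num
      simpa using ih (acc ++ [x])

theorem finalSequence_eq_alt (l : List String) : finalSequence l = finalSequence_alt l := by
  induction l with
  | nil => simp [finalSequence, finalSequence_alt]
  | cons x xs ih =>
      by_cases hx : x = "M"
      · subst hx
        simp only [finalSequence, List.foldl_cons, finalSequenceStep]
        norm_num
        rw [finalSequenceStep_saturated]
        have hmem : "M" ∈ "M" :: xs := List.mem_cons_self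
        simp only [finalSequence_alt, if_pos hmem, PySem.List.index?_cons_self]
        simp [PySem.List.slice]
      · simp only [finalSequence, List.foldl_cons, finalSequenceStep] at *
        norm_num [hx]
        rw [ih]
        unfold finalSequence_alt
        rw [PySem.List.index?_cons_of_ne (x := x) (v := "M") (xs := xs) hx]
        by_cases hm : "M" ∈ xs
        · have hm' : "M" ∈ x :: xs := List.mem_cons_of_mem _ hm
          simp only [if_pos hm, if_pos hm']
          obtain ⟨i, hi⟩ := (PySem.List.index?_isSome_iff xs "M").2 hm |> Option.isSome_iff_exists.mp
          rw [hi]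
          simp only [Option.map_some]
          rw [PySem.List.slice_from_natCast, PySem.List.slice_from_natCast]
          simp
        · have hm' : "M" ∉ x :: xs := by simp [hx, hm, Ne.symm]
          simp [hm, hm']

-- ===== VERDICT (by name: the statement is the Claim_ definition above) =====
theorem finalSequence_spec : Claim_equal_finalSequence := by
  intro l _
  exact finalSequence_eq_alt l
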